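-- pv_equiv track=rewrite | github.com/chuanbei2026/model-parallelism-tutorial | mp_tutorial/viz.py | _generate_gpipe_schedule
-- ===== SOURCE A (Python) =====
-- def _generate_gpipe_schedule(num_stages, num_microbatches, bwd_factor=2):
--     """Generate GPipe schedule: all forwards, then all backwards.
--
--     Returns list of (start_time, stage, microbatch, kind, duration).
--     Forward takes 1 time unit; backward takes *bwd_factor* time units.
--     """
--     schedule = []
--     # Forward passes: stage s starts micro-batch m at time s + m
--     for m in range(num_microbatches):
--         for s in range(num_stages):
--             t = s + m
--             schedule.append((t, s, m, "fwd", 1))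
--
--     # Backward passes start after ALL forwards complete.
--     fwd_end = num_stages + num_microbatches - 1
--
--     # Backward flows from last stage to first.
--     bwd_times = {}
--     for m in range(num_microbatches):
--         for s in range(num_stages - 1, -1, -1):
--             if s == num_stages - 1:
--                 t = fwd_end + m * bwd_factor
--             else:
--                 t = bwd_times[(s + 1, m)] + bwd_factor
--             bwd_times[(s, m)] = t
--             schedule.append((t, s, m, "bwd", bwd_factor))
--
--     return schedule
-- ===== SOURCE B (Python) =====
-- def _generate_gpipe_schedule(num_stages, num_microbatches, bwd_factor=2):
--     """Same schedule via a single flat index loop: each entry's position k is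
--     decoded with divmod into (microbatch, stage) and its start time is a closed
--     form, so the nested loops and the bwd_times dict disappear."""
--     S = max(num_stages, 0)
--     M = max(num_microbatches, 0)
--     n = S * M
--     fwd_end = num_stages + num_microbatches - 1
--     sched = []
--     for k in range(n):
--         m, s = divmod(k, S)
--         sched.append((s + m, s, m, "fwd", 1))
--     for k in range(n):
--         m, r = divmod(k, S)
--         sched.append((fwd_end + (m + r) * bwd_factor, S - 1 - r, m, "bwd", bwd_factor))
--     return sched
-- ===== Notes on version B (the rewrite author's own statement) =====
-- stated objective: alternative
-- what changed: The nested loops and the bwd_times dict recurrence are replaced by two flat loops over a single index k that divmod-decode (microbatch, stage) and compute every start time (including backward) by a closed form.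
import Mathlib
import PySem

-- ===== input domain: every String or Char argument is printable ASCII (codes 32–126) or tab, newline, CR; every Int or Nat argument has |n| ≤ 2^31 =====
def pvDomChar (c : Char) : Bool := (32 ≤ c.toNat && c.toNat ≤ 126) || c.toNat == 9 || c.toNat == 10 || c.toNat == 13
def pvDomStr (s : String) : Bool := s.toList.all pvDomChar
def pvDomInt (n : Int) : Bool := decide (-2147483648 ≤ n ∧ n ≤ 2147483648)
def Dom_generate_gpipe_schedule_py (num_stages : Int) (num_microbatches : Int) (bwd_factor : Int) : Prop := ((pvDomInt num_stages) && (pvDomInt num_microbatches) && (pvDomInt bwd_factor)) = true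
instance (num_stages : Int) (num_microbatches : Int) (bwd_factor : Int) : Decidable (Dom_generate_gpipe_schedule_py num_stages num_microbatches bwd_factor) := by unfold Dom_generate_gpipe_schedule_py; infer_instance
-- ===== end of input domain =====

-- Header: B replaces A's nested loops and bwd_times dict recurrence by two flat loops
-- over a single index k, divmod-decoded into (microbatch, stage), with closed-form
-- start times (alternative decomposition; same output list, same order).

-- ===== PORT A =====
-- Note: A's lookup bwd_times[(s+1, m)] can never raise KeyError (the key is inserted in
-- the previous inner iteration); the port reads it with getD 0, which is exact here.
def generate_gpipe_schedule_py (num_stages : Int) (num_microbatches : Int) (bwd_factor : Int) : List (Int × Int × Int × String × Int) :=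
  let schedule : List (Int × Int × Int × String × Int) :=
    (PySem.List.pyRange 0 num_microbatches 1).foldl (fun sched m =>
      (PySem.List.pyRange 0 num_stages 1).foldl (fun sched s =>
        sched ++ [(s + m, s, m, "fwd", (1 : Int))]) sched) []
  let fwd_end := num_stages + num_microbatches - 1
  let res :=
    (PySem.List.pyRange 0 num_microbatches 1).foldl
      (fun (acc : PySem.Dict (Int × Int) Int × List (Int × Int × Int × String × Int)) m =>
        (PySem.List.pyRange (num_stages - 1) (-1) (-1)).foldl
          (fun acc s =>
            let t := if s = num_stages - 1 then fwd_end + m * bwd_factor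
                     else ((acc.1.get? (s + 1, m)).getD 0) + bwd_factor
            (acc.1.insert (s, m) t, acc.2 ++ [(t, s, m, "bwd", bwd_factor)])) acc)
      (PySem.Dict.empty, schedule)
  res.2

-- ===== PORT B =====
-- Note: divmod(k, S) is ported as (floordiv k S, mod k S); it can never raise
-- (S = 0 makes both loops empty), so the Option-free primitives are exact here.
def generate_gpipe_schedule_py_alt (num_stages : Int) (num_microbatches : Int) (bwd_factor : Int) : List (Int × Int × Int × String × Int) :=
  let S : Int := max num_stages 0
  let M : Int := max num_microbatches 0
  let n : Int := S * M
  let fwd_end : Int := num_stages + num_microbatches - 1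
  let sched : List (Int × Int × Int × String × Int) :=
    (PySem.List.pyRange 0 n 1).foldl (fun sched k =>
      let m := PySem.Int.floordiv k S
      let s := PySem.Int.mod k S
      sched ++ [(s + m, s, m, "fwd", (1 : Int))]) []
  (PySem.List.pyRange 0 n 1).foldl (fun sched k =>
    let m := PySem.Int.floordiv k S
    let r := PySem.Int.mod k S
    sched ++ [(fwd_end + (m + r) * bwd_factor, S - 1 - r, m, "bwd", bwd_factor)]) sched

-- ===== PRECONDITION & SPEC =====
def Spec_generate_gpipe_schedule_py (num_stages : Int) (num_microbatches : Int) (bwd_factor : Int) (out : List (Int × Int × Int × String × Int)) : Prop := out = generate_gpipe_schedule_py_alt num_stages num_microbatches bwd_factor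
instance (num_stages : Int) (num_microbatches : Int) (bwd_factor : Int) (out : List (Int × Int × Int × String × Int)) : Decidable (Spec_generate_gpipe_schedule_py num_stages num_microbatches bwd_factor out) := by unfold Spec_generate_gpipe_schedule_py; infer_instance

-- ===== CLAIM (what is proved, stated in full; the proofs are below) =====
def Claim_equal_generate_gpipe_schedule_py : Prop := ∀ (num_stages : Int) (num_microbatches : Int) (bwd_factor : Int), Dom_generate_gpipe_schedule_py num_stages num_microbatches bwd_factor → Spec_generate_gpipe_schedule_py num_stages num_microbatches bwd_factor (generate_gpipe_schedule_py num_stages num_microbatches bwd_factor)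

-- ===== LEMMAS AND PROOFS =====

-- The closed-form backward start time.
def pvT (num_stages num_microbatches bwd_factor m s : Int) : Int :=
  (num_stages + num_microbatches - 1) + m * bwd_factor + (num_stages - 1 - s) * bwd_factor

-- The common normal form both ports are proved equal to.
def pvC (num_stages num_microbatches bwd_factor : Int) : List (Int × Int × Int × String × Int) :=
  (PySem.List.pyRange 0 num_microbatches 1).flatMap (fun m =>
    (PySem.List.pyRange 0 num_stages 1).map (fun s => (s + m, s, m, "fwd", (1 : Int)))) ++
  (PySem.List.pyRange 0 num_microbatches 1).flatMap (fun m =>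
    (PySem.List.pyRange (num_stages - 1) (-1) (-1)).map (fun s =>
      (pvT num_stages num_microbatches bwd_factor m s, s, m, "bwd", bwd_factor)))

-- A's inner backward loop, named so the lemmas can speak about it.
def pvInner (num_stages num_microbatches bwd_factor m : Int)
    (j : Int) (acc : PySem.Dict (Int × Int) Int × List (Int × Int × Int × String × Int)) :
    PySem.Dict (Int × Int) Int × List (Int × Int × Int × String × Int) :=
  (PySem.List.pyRange j (-1) (-1)).foldl
    (fun acc s =>
      let t := if s = num_stages - 1 then (num_stages + num_microbatches - 1) + m * bwd_factor
               else ((acc.1.get? (s + 1, m)).getD 0) + bwd_factor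
      (acc.1.insert (s, m) t, acc.2 ++ [(t, s, m, "bwd", bwd_factor)])) acc

-- Inner loop: given the dict knows the (j+1, m) time (unless j is the last stage),
-- it appends exactly the closed-form tuples, for some final dict.
theorem pvInner_eq (num_stages num_microbatches bwd_factor m : Int) :
    ∀ (k : Nat) (d : PySem.Dict (Int × Int) Int) (sched : List (Int × Int × Int × String × Int)),
      ((k : Int) - 1 ≠ num_stages - 1 → d.get? ((k : Int), m) = some (pvT num_stages num_microbatches bwd_factor m (k : Int))) →
      ∃ d', pvInner num_stages num_microbatches bwd_factor m ((k : Int) - 1) (d, sched) =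
        (d', sched ++ (PySem.List.pyRange ((k : Int) - 1) (-1) (-1)).map
          (fun s => (pvT num_stages num_microbatches bwd_factor m s, s, m, "bwd", bwd_factor))) := by
  intro k
  induction k with
  | zero =>
    intro d sched _
    refine ⟨d, ?_⟩
    simp [pvInner]
  | succ k ih =>
    intro d sched hd
    have hlt : (-1 : Int) < (k + 1 : Nat) - 1 := by push_cast; omega
    rw [pvInner, PySem.List.pyRange_neg_one_cons hlt]
    simp only [List.foldl_cons, List.map_cons]
    set j : Int := ((k + 1 : Nat) : Int) - 1 with hj
    have hjk : j - 1 = (k : Int) - 1 := by push_cast [hj]; omega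
    have ht : (if j = num_stages - 1 then (num_stages + num_microbatches - 1) + m * bwd_factor
               else ((d.get? (j + 1, m)).getD 0) + bwd_factor) =
        pvT num_stages num_microbatches bwd_factor m j := by
      by_cases hcase : j = num_stages - 1
      · simp [hcase, pvT]
      · have hget := hd hcase
        have : j + 1 = ((k + 1 : Nat) : Int) := by omega
        rw [if_neg hcase, this, hget]
        have hjeq : j = (k : Int) := by push_cast [hj]; omega
        simp only [Option.getD_some, pvT, hjeq]
        push_cast
        ring
    rw [ht]
    have hnext : ((d.insert (j, m) (pvT num_stages num_microbatches bwd_factor m j)).get?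
        (((k : Nat) : Int), m)) = some (pvT num_stages num_microbatches bwd_factor m ((k : Nat) : Int)) := by
      have hkj : (((k : Nat) : Int), m) = ((j, m) : Int × Int) := by
        have : ((k : Nat) : Int) = j := by push_cast [hj]; omega
        rw [this]
      rw [hkj]
      rw [PySem.Dict.get?_insert_self]
      congr 1
      congr 1
      push_cast [hj]; omega
    obtain ⟨d', hrec⟩ := ih (d.insert (j, m) (pvT num_stages num_microbatches bwd_factor m j))
      (sched ++ [(pvT num_stages num_microbatches bwd_factor m j, j, m, "bwd", bwd_factor)])
      (fun _ => hnext)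
    refine ⟨d', ?_⟩
    rw [pvInner] at hrec
    rw [hjk] at *
    rw [hrec]
    simp

-- Inner loop from the top stage: no precondition on the dict is needed.
theorem pvInner_top (num_stages num_microbatches bwd_factor m : Int)
    (d : PySem.Dict (Int × Int) Int) (sched : List (Int × Int × Int × String × Int)) :
    ∃ d', pvInner num_stages num_microbatches bwd_factor m (num_stages - 1) (d, sched) =
      (d', sched ++ (PySem.List.pyRange (num_stages - 1) (-1) (-1)).map
        (fun s => (pvT num_stages num_microbatches bwd_factor m s, s, m, "bwd", bwd_factor))) := by
  by_cases hn : 0 < num_stages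
  · have hk : num_stages - 1 = ((num_stages.toNat : Int)) - 1 := by omega
    rw [hk]
    exact pvInner_eq num_stages num_microbatches bwd_factor m num_stages.toNat d sched
      (fun h => absurd (by omega : (num_stages.toNat : Int) - 1 = num_stages - 1) h)
  · refine ⟨d, ?_⟩
    simp [pvInner, PySem.List.pyRange_neg_one_eq_nil (by omega : num_stages - 1 ≤ -1)]

-- Outer backward loop over any list of micro-batch indices.
theorem pvOuter_eq (num_stages num_microbatches bwd_factor : Int) :
    ∀ (L : List Int) (d : PySem.Dict (Int × Int) Int) (sched : List (Int × Int × Int × String × Int)),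
      ∃ d', L.foldl
        (fun (acc : PySem.Dict (Int × Int) Int × List (Int × Int × Int × String × Int)) m =>
          pvInner num_stages num_microbatches bwd_factor m (num_stages - 1) acc) (d, sched) =
        (d', sched ++ L.flatMap (fun m =>
          (PySem.List.pyRange (num_stages - 1) (-1) (-1)).map
            (fun s => (pvT num_stages num_microbatches bwd_factor m s, s, m, "bwd", bwd_factor)))) := by
  intro L
  induction L with
  | nil => intro d sched; exact ⟨d, by simp⟩
  | cons m L ih =>
    intro d sched
    obtain ⟨d1, h1⟩ := pvInner_top num_stages num_microbatches bwd_factor m d sched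
    obtain ⟨d', h2⟩ := ih d1 (sched ++ (PySem.List.pyRange (num_stages - 1) (-1) (-1)).map
      (fun s => (pvT num_stages num_microbatches bwd_factor m s, s, m, "bwd", bwd_factor)))
    refine ⟨d', ?_⟩
    simp only [List.foldl_cons, h1, h2, List.flatMap_cons, List.append_assoc]

-- A equals the normal form.
theorem pvA_eq_C (num_stages num_microbatches bwd_factor : Int) :
    generate_gpipe_schedule_py num_stages num_microbatches bwd_factor =
      pvC num_stages num_microbatches bwd_factor := by
  unfold generate_gpipe_schedule_py pvC
  have hfwd : (PySem.List.pyRange 0 num_microbatches 1).foldl (fun sched m =>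
      (PySem.List.pyRange 0 num_stages 1).foldl (fun sched s =>
        sched ++ [(s + m, s, m, "fwd", (1 : Int))]) sched) [] =
      (PySem.List.pyRange 0 num_microbatches 1).flatMap (fun m =>
        (PySem.List.pyRange 0 num_stages 1).map (fun s => (s + m, s, m, "fwd", (1 : Int)))) := by
    have hfun : (fun (sched : List (Int × Int × Int × String × Int)) (m : Int) =>
        (PySem.List.pyRange 0 num_stages 1).foldl (fun sched s =>
          sched ++ [(s + m, s, m, "fwd", (1 : Int))]) sched) =
        (fun sched m => sched ++ (PySem.List.pyRange 0 num_stages 1).map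
          (fun s => (s + m, s, m, "fwd", (1 : Int)))) := by
      funext sched m
      exact PySem.List.foldl_append_singleton_eq_map _ _ _
    rw [hfun, PySem.List.foldl_append_eq_flatMap]
    simp
  obtain ⟨d', hbwd⟩ := pvOuter_eq num_stages num_microbatches bwd_factor
    (PySem.List.pyRange 0 num_microbatches 1) PySem.Dict.empty
    ((PySem.List.pyRange 0 num_microbatches 1).flatMap (fun m =>
      (PySem.List.pyRange 0 num_stages 1).map (fun s => (s + m, s, m, "fwd", (1 : Int)))))
  simp only [hfwd]
  have : (PySem.List.pyRange 0 num_microbatches 1).foldl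
      (fun (acc : PySem.Dict (Int × Int) Int × List (Int × Int × Int × String × Int)) m =>
        pvInner num_stages num_microbatches bwd_factor m (num_stages - 1) acc)
      (PySem.Dict.empty, (PySem.List.pyRange 0 num_microbatches 1).flatMap (fun m =>
        (PySem.List.pyRange 0 num_stages 1).map (fun s => (s + m, s, m, "fwd", (1 : Int))))) =
      (d', _) := hbwd
  simp only [pvInner] at this
  rw [this]

-- Congruence for flatMap (pointwise on members).
theorem pvFlatMap_congr {α β : Type} (l : List α) (f g : α → List β)
    (h : ∀ a ∈ l, f a = g a) : l.flatMap f = l.flatMap g := by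
  induction l with
  | nil => rfl
  | cons a l ih =>
    simp only [List.flatMap_cons]
    rw [h a (by simp), ih (fun x hx => h x (by simp [hx]))]

-- A map over the flat index range 0..S*M-1 is the nested flatMap after divmod decoding.
theorem pvRange_mul_flatMap {α : Type} (S M : Nat) (g : Nat → α) :
    (List.range (S * M)).map g =
      (List.range M).flatMap (fun m => (List.range S).map (fun s => g (m * S + s))) := by
  induction M with
  | zero => simp
  | succ M ih =>
    rw [Nat.mul_succ, List.range_add, List.map_append, ih, List.range_succ,
      List.flatMap_append]
    simp [Function.comp_def, Nat.mul_comm S M]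

-- B equals the normal form.
theorem pvB_eq_C (num_stages num_microbatches bwd_factor : Int) :
    generate_gpipe_schedule_py_alt num_stages num_microbatches bwd_factor =
      pvC num_stages num_microbatches bwd_factor := by
  unfold generate_gpipe_schedule_py_alt pvC
  simp only [PySem.List.foldl_append_singleton_eq_map, List.nil_append]
  have hS : max num_stages 0 = ((num_stages.toNat : Int)) := by omega
  have hM : max num_microbatches 0 = ((num_microbatches.toNat : Int)) := by omega
  set Sn := num_stages.toNat with hSn
  set Mn := num_microbatches.toNat with hMn
  have hn : max num_stages 0 * max num_microbatches 0 = ((Sn * Mn : Nat) : Int) := by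
    rw [hS, hM]; push_cast; ring
  rw [hn, hS]
  -- rewrite all pyRanges to Nat ranges
  rw [PySem.List.pyRange_one 0 ((Sn * Mn : Nat) : Int),
      PySem.List.pyRange_one 0 num_microbatches, PySem.List.pyRange_one 0 num_stages,
      PySem.List.pyRange_neg_one (num_stages - 1) (-1)]
  simp only [sub_zero, Int.toNat_natCast, zero_add, List.map_map, List.flatMap_map]
  have hSn' : (num_stages - 1 - -1).toNat = Sn := by omega
  rw [hSn']
  rw [pvRange_mul_flatMap Sn Mn, pvRange_mul_flatMap Sn Mn]
  congr 1
  · -- forward part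
    apply pvFlatMap_congr
    intro m _
    apply List.map_congr_left
    intro s hs
    have hsS : s < Sn := List.mem_range.mp hs
    have hS0 : 0 < Sn := Nat.lt_of_le_of_lt (Nat.zero_le s) hsS
    simp only [Function.comp_def]
    rw [show ((↑(m * Sn + s) : Int)) = ((m * Sn + s : Nat) : Int) from rfl]
    rw [PySem.Int.floordiv_natCast, PySem.Int.mod_natCast]
    have hdiv : (m * Sn + s) / Sn = m := by
      rw [Nat.mul_comm m Sn, Nat.mul_add_div hS0, Nat.div_eq_of_lt hsS, Nat.add_zero]
    have hmod : (m * Sn + s) % Sn = s := by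
      rw [Nat.mul_comm m Sn, Nat.mul_add_mod, Nat.mod_eq_of_lt hsS]
    rw [hdiv, hmod]
  · -- backward part
    apply pvFlatMap_congr
    intro m _
    apply List.map_congr_left
    intro s hs
    have hsS : s < Sn := List.mem_range.mp hs
    have hS0 : 0 < Sn := Nat.lt_of_le_of_lt (Nat.zero_le s) hsS
    have hns : ((Sn : Int)) = num_stages := by omega
    simp only [Function.comp_def]
    rw [show ((↑(m * Sn + s) : Int)) = ((m * Sn + s : Nat) : Int) from rfl]
    rw [PySem.Int.floordiv_natCast, PySem.Int.mod_natCast]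
    have hdiv : (m * Sn + s) / Sn = m := by
      rw [Nat.mul_comm m Sn, Nat.mul_add_div hS0, Nat.div_eq_of_lt hsS, Nat.add_zero]
    have hmod : (m * Sn + s) % Sn = s := by
      rw [Nat.mul_comm m Sn, Nat.mul_add_mod, Nat.mod_eq_of_lt hsS]
    rw [hdiv, hmod]
    have h1 : num_stages + num_microbatches - 1 + (((m : Int)) + ((s : Int))) * bwd_factor =
        pvT num_stages num_microbatches bwd_factor ((m : Int)) (num_stages - 1 - ((s : Int))) := by
      simp only [pvT]; ring
    have h2 : ((Sn : Int)) - 1 - ((s : Int)) = num_stages - 1 - ((s : Int)) := by omega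
    rw [h1, h2]

-- ===== VERDICT (by name: the statement is the Claim_ definition above) =====
theorem generate_gpipe_schedule_py_spec : Claim_equal_generate_gpipe_schedule_py := by
  intro num_stages num_microbatches bwd_factor _
  unfold Spec_generate_gpipe_schedule_py
  rw [pvA_eq_C, pvB_eq_C]
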